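-- pv_equiv track=rewrite | github.com/tianyangzhang123/SDE-GPG-ACL25 | dataset_update.py | update_next_pos
-- ===== SOURCE A (Python) =====
-- def update_next_pos(seq, words):
--     sls = seq.split(" ")
--     new_seq = set()
--     for word in words:
--         for i in range(len(seq)):
--             new_seq.add(" ".join(sls[:i] + [word] + sls[i:]))
--         new_seq.add(" ".join(sls + [word]))
--     return new_seq
-- ===== SOURCE B (Python) =====
-- def update_next_pos(seq, words):
--     sls = seq.split(" ")
--     # dynamic programming over joins: sufs[i] == " ".join(sls[i:]), built back-to-front
--     sufs = []
--     for tok in reversed(sls):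
--         sufs.append(tok if not sufs else tok + " " + sufs[-1])
--     sufs.reverse()
--     # prefs[i] == " ".join(sls[:i+1]), built front-to-back
--     prefs = []
--     for tok in sls:
--         prefs.append(tok if not prefs else prefs[-1] + " " + tok)
--     out = set()
--     for word in words:
--         for i in range(len(sls) + 1):
--             if i == 0:
--                 out.add(word + " " + sufs[0])
--             elif i == len(sls):
--                 out.add(prefs[i - 1] + " " + word)
--             else:
--                 out.add(prefs[i - 1] + " " + word + " " + sufs[i])
--     return out
-- ===== Notes on version B (the rewrite author's own statement) =====
-- stated objective: faster
-- what changed: B precomputes running prefix-join and suffix-join tables of the token list (one dynamic-programming pass each way) and emits each insertion as a three-piece concatenation prefs[i-1]+' '+word+' '+sufs[i], replacing A's loop over character positions range(len(seq)) that rebuilds each candidate with list slicing and a full ' '.join.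
-- intended difference: On inputs whose seq consists only of spaces (including the empty string) and whose words contain a not-all-space word, A's character-length loop stops one token position short and returns a set missing the insertion before the last (empty) token (A('',['a'])={' a'}), while B returns all len(sls)+1 insertion positions (B('',['a'])={' a','a '}), the intended set of all single-word insertions. — e.g. on update_next_pos("", ["a"]): A returns [" a"], B returns ["a ", " a"]
import Mathlib
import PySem

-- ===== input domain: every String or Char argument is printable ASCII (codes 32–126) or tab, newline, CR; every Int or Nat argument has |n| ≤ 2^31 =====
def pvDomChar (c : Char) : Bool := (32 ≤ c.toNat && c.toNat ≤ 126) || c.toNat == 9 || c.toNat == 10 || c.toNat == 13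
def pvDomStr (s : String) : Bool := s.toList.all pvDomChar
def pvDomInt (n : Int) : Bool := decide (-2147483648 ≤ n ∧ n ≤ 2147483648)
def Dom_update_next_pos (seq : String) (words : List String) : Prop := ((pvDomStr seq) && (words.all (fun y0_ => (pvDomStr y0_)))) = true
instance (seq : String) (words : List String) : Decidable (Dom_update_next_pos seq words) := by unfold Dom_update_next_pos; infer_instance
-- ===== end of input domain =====

-- One honest line: B precomputes running prefix/suffix joins of the token list (a dynamic
-- programming pass each way) and emits each insertion by three O(1)-lookup concatenations,
-- instead of A's per-character-position slice-and-join loop (faster: fewer and cheaper joins).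

-- ===== PORT A =====
def update_next_pos (seq : String) (words : List String) : List String :=
  -- sls = seq.split(" "): sep " " is nonempty, so split? never raises (never none)
  let sls := (PySem.Str.split? seq " ").getD []
  words.foldl (fun new_seq word =>
    let new_seq := (PySem.List.pyRange 0 (PySem.Str.len seq) 1).foldl
      (fun ns i => PySem.Set.add ns (PySem.Str.join " "
        (PySem.List.slice sls none (some i) ++ [word] ++ PySem.List.slice sls (some i) none))) new_seq
    PySem.Set.add new_seq (PySem.Str.join " " (sls ++ [word])))
    PySem.Set.empty

-- ===== PORT B =====
-- helper for B's first loop: sufs built back-to-front over reversed(sls)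
-- ('sufs.append(tok if not sufs else tok + " " + sufs[-1])')
def pvSufJoinsRev (sls : List String) : List String :=
  sls.reverse.foldl (fun sufs tok =>
    sufs ++ [match sufs.getLast? with
             | none => tok
             | some last => tok ++ " " ++ last]) []

-- helper for B's second loop: prefs built front-to-back
-- ('prefs.append(tok if not prefs else prefs[-1] + " " + tok)')
def pvPrefJoins (sls : List String) : List String :=
  sls.foldl (fun prefs tok =>
    prefs ++ [match prefs.getLast? with
             | none => tok
             | some last => last ++ " " ++ tok]) []

def update_next_pos_alt (seq : String) (words : List String) : List String :=
  -- sls = seq.split(" "): sep " " is nonempty, so split? never raises (never none)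
  let sls := (PySem.Str.split? seq " ").getD []
  let sufs := (pvSufJoinsRev sls).reverse
  let prefs := pvPrefJoins sls
  words.foldl (fun out word =>
    (PySem.List.pyRange 0 ((sls.length : Int) + 1) 1).foldl (fun out i =>
      if i = 0 then
        PySem.Set.add out (word ++ " " ++ ((PySem.List.pyGet? sufs 0).getD ""))
      else if i = (sls.length : Int) then
        PySem.Set.add out (((PySem.List.pyGet? prefs (i - 1)).getD "") ++ " " ++ word)
      else
        PySem.Set.add out (((PySem.List.pyGet? prefs (i - 1)).getD "") ++ " " ++ word ++ " " ++
          ((PySem.List.pyGet? sufs i).getD ""))) out)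
    PySem.Set.empty

-- ===== PRECONDITION & SPEC =====
-- On inputs whose seq consists only of spaces (including the empty string) and whose words contain
-- a word that is not all spaces, A's character-length loop stops one token position short and returns
-- a set missing the insertion before the last (empty) token, while B returns all len(sls)+1 insertion
-- positions — the intended set of all single-word insertions.
def D_update_next_pos (seq : String) (words : List String) : Prop :=
  (seq.toList.all (fun c => c == ' ') = true) ∧
  ¬ (words.all (fun w => w.toList.all (fun c => c == ' ')) = true)
instance (seq : String) (words : List String) : Decidable (D_update_next_pos seq words) := by
  unfold D_update_next_pos; infer_instance

def Spec_update_next_pos (seq : String) (words : List String) (out : List String) : Prop :=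
  ¬ D_update_next_pos seq words → out = update_next_pos_alt seq words
instance (seq : String) (words : List String) (out : List String) : Decidable (Spec_update_next_pos seq words out) := by unfold Spec_update_next_pos; infer_instance

def pvDiffWitness_update_next_pos : String × List String := ("", ["a"])
def pvDiffWitnessOut_update_next_pos : (List String) × (List String) := ([" a"], ["a ", " a"])

-- ===== CLAIM (what is proved, stated in full; the proofs are below) =====
def Claim_unchanged_update_next_pos : Prop := ∀ (seq : String) (words : List String), Dom_update_next_pos seq words → Spec_update_next_pos seq words (update_next_pos seq words)
def Claim_changed_update_next_pos : Prop := Dom_update_next_pos (pvDiffWitness_update_next_pos.1) (pvDiffWitness_update_next_pos.2) ∧ D_update_next_pos (pvDiffWitness_update_next_pos.1) (pvDiffWitness_update_next_pos.2) ∧ update_next_pos (pvDiffWitness_update_next_pos.1) (pvDiffWitness_update_next_pos.2) = pvDiffWitnessOut_update_next_pos.1 ∧ update_next_pos_alt (pvDiffWitness_update_next_pos.1) (pvDiffWitness_update_next_pos.2) = pvDiffWitnessOut_update_next_pos.2 ∧ pvDiffWitnessOut_update_next_pos.1 ≠ pvDiffWitnessOut_update_next_pos.2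

-- ===== LEMMAS AND PROOFS =====

-- length of Python's split(" ") at the character level: 1 + (number of spaces)
theorem pv_go_len (sp : Char) : ∀ (l : List Char) (fuel : Nat) (cur : List Char) (acc : List (List Char)),
    l.length ≤ fuel →
    (PySem.Chars.splitOn.go [sp] fuel l cur acc).length = acc.length + 1 + l.count sp := by
  intro l
  induction l with
  | nil =>
    intro fuel cur acc _
    cases fuel <;> simp [PySem.Chars.splitOn.go]
  | cons c rest ih =>
    intro fuel cur acc hf
    cases fuel with
    | zero => simp at hf
    | succ fuel =>
      by_cases hc : c = sp
      · subst hc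
        have hpre : List.isPrefixOf [c] (c :: rest) = true := by
          simp [List.isPrefixOf]
        rw [show PySem.Chars.splitOn.go [c] (fuel+1) (c :: rest) cur acc
              = PySem.Chars.splitOn.go [c] fuel (List.drop 1 (c :: rest)) [] (cur.reverse :: acc) by
              simp [PySem.Chars.splitOn.go, hpre]]
        simp only [List.drop_succ_cons, List.drop_zero]
        rw [ih fuel [] (cur.reverse :: acc) (by simpa using Nat.le_of_succ_le_succ (by simpa using hf))]
        simp
        omega
      · have hpre : List.isPrefixOf [sp] (c :: rest) = false := by
          simp [List.isPrefixOf]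
          exact fun h => absurd h.symm hc
        rw [show PySem.Chars.splitOn.go [sp] (fuel+1) (c :: rest) cur acc
              = PySem.Chars.splitOn.go [sp] fuel rest (c :: cur) acc by
              simp [PySem.Chars.splitOn.go, hpre]]
        rw [ih fuel (c :: cur) acc (by simpa using Nat.le_of_succ_le_succ (by simpa using hf))]
        simp [hc]

theorem pv_splitOn_length (sp : Char) (l : List Char) :
    (PySem.Chars.splitOn l [sp]).length = 1 + l.count sp := by
  unfold PySem.Chars.splitOn
  rw [pv_go_len sp l (l.length + 1) [] [] (by omega)]
  simp

-- sls = seq.split(" ") is never empty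
theorem pv_sls_ne_nil (seq : String) : ((PySem.Str.split? seq " ").getD []) ≠ [] := by
  have hbr := PySem.Str.split?_map seq " "
  have hsep : (" " : String).toList = [' '] := rfl
  rw [hsep] at hbr
  have hsome : PySem.Chars.split? seq.toList [' '] = some (PySem.Chars.splitOn seq.toList [' ']) := by
    simp [PySem.Chars.split?]
  rw [hsome] at hbr
  cases hsp : PySem.Str.split? seq " " with
  | none => rw [hsp] at hbr; simp at hbr
  | some r =>
    rw [hsp] at hbr
    simp only [Option.map_some, Option.some_inj] at hbr
    have hlen : r.length = (PySem.Chars.splitOn seq.toList [' ']).length := by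
      rw [← hbr, List.length_map]
    rw [pv_splitOn_length] at hlen
    simp only [Option.getD_some]
    intro h
    rw [h] at hlen
    simp at hlen
    omega

-- adding the same element again (possibly many times) does not change a set
theorem pv_add_add {s : PySem.Set String} {e : String} :
    PySem.Set.add (PySem.Set.add s e) e = PySem.Set.add s e := by
  apply PySem.Set.add_of_mem
  exact (PySem.Set.mem_add s e e).2 (Or.inr rfl)

theorem pv_add_foldl_const (e : String) : ∀ (l : List Int) (s : PySem.Set String),
    PySem.Set.add (l.foldl (fun a (_ : Int) => PySem.Set.add a e) s) e = PySem.Set.add s e := by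
  intro l
  induction l with
  | nil => intro s; rfl
  | cons x t ih =>
    intro s
    simp only [List.foldl_cons]
    rw [ih (PySem.Set.add s e), pv_add_add]

-- the insertion string at any position i ≥ len(sls) is the appended string
theorem pv_J_high (sls : List String) (word : String) (i : Int)
    (h : (sls.length : Int) ≤ i) :
    PySem.Str.join " " (PySem.List.slice sls none (some i) ++ [word] ++ PySem.List.slice sls (some i) none)
      = PySem.Str.join " " (sls ++ [word]) := by
  have h0 : (0 : Int) ≤ i := le_trans (by positivity) h
  rw [PySem.List.slice_to _ h0, PySem.List.slice_from _ h0]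
  have hlen : sls.length ≤ i.toNat := by omega
  rw [List.take_of_length_le hlen, List.drop_eq_nil_of_le hlen, List.append_nil]

-- per-word inner loops agree when len(sls) ≤ L
theorem pv_inner (sls : List String) (word : String) (L : Int)
    (h : (sls.length : Int) ≤ L) (acc : PySem.Set String) :
    PySem.Set.add
      ((PySem.List.pyRange 0 L 1).foldl
        (fun ns i => PySem.Set.add ns (PySem.Str.join " "
          (PySem.List.slice sls none (some i) ++ [word] ++ PySem.List.slice sls (some i) none))) acc)
      (PySem.Str.join " " (sls ++ [word]))
    = ((PySem.List.pyRange 0 ((sls.length : Int) + 1) 1).map (fun i =>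
        PySem.Str.join " " (PySem.List.slice sls none (some i) ++ [word] ++ PySem.List.slice sls (some i) none))).foldl
        PySem.Set.add acc := by
  have h0n : (0 : Int) ≤ (sls.length : Int) := by positivity
  rw [List.foldl_map]
  rw [PySem.List.pyRange_one_succ_right h0n]
  rw [PySem.List.pyRange_one_append 0 ((sls.length : Int)) L h0n h]
  rw [List.foldl_append, List.foldl_append]
  simp only [List.foldl_cons, List.foldl_nil]
  rw [pv_J_high sls word ((sls.length : Int)) (le_refl _)]
  rw [PySem.List.foldl_congr_mem (PySem.List.pyRange ((sls.length : Int)) L 1) _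
    (fun ns (_ : Int) => PySem.Set.add ns (PySem.Str.join " " (sls ++ [word]))) _
    (by
      intro a x hx
      have hx' := (PySem.List.mem_pyRange_one).1 hx
      rw [pv_J_high sls word x hx'.1])]
  rw [pv_add_foldl_const]

-- a non-space character bounds len(sls) by len(seq)
theorem pv_sls_len_le (seq : String)
    (hns : ¬ (seq.toList.all (fun c => c == ' ') = true)) :
    (((PySem.Str.split? seq " ").getD []).length : Int) ≤ PySem.Str.len seq := by
  have hbr := PySem.Str.split?_map seq " "
  have hsep : (" " : String).toList = [' '] := rfl
  rw [hsep] at hbr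
  have hsome : PySem.Chars.split? seq.toList [' '] = some (PySem.Chars.splitOn seq.toList [' ']) := by
    simp [PySem.Chars.split?]
  rw [hsome] at hbr
  cases hsp : PySem.Str.split? seq " " with
  | none => rw [hsp] at hbr; simp at hbr
  | some r =>
    rw [hsp] at hbr
    simp only [Option.map_some, Option.some_inj] at hbr
    have hlen : r.length = (PySem.Chars.splitOn seq.toList [' ']).length := by
      rw [← hbr, List.length_map]
    have hcount : seq.toList.count ' ' < seq.toList.length := by
      rcases (by simpa using hns : ∃ c ∈ seq.toList, ¬ c = ' ') with ⟨c, hc, hcne⟩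
      have hle : seq.toList.count ' ' ≤ seq.toList.length := List.count_le_length
      have hne : seq.toList.count ' ' ≠ seq.toList.length := by
        intro heq
        exact hcne ((List.count_eq_length.1 heq) c hc).symm
      omega
    have hL : PySem.Str.len seq = (seq.toList.length : Int) := by
      simp [PySem.Str.len_eq]
    rw [hL]
    simp only [Option.getD_some]
    rw [hlen, pv_splitOn_length]
    omega

-- split(" ") of an all-space string: all tokens are empty
theorem pv_go_allspace : ∀ (m : Nat) (fuel : Nat) (cur : List Char) (acc : List (List Char)),
    m ≤ fuel →
    PySem.Chars.splitOn.go [' '] fuel (List.replicate m ' ') cur acc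
      = acc.reverse ++ cur.reverse :: List.replicate m [] := by
  intro m
  induction m with
  | zero =>
    intro fuel cur acc _
    cases fuel <;> simp [PySem.Chars.splitOn.go]
  | succ m ih =>
    intro fuel cur acc hf
    cases fuel with
    | zero => omega
    | succ fuel =>
      rw [List.replicate_succ]
      have hpre : List.isPrefixOf [' '] (' ' :: List.replicate m ' ') = true := by
        simp [List.isPrefixOf]
      rw [show PySem.Chars.splitOn.go [' '] (fuel+1) (' ' :: List.replicate m ' ') cur acc
            = PySem.Chars.splitOn.go [' '] fuel (List.drop 1 (' ' :: List.replicate m ' ')) []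
                (cur.reverse :: acc) by
            simp [PySem.Chars.splitOn.go, hpre]]
      simp only [List.drop_succ_cons, List.drop_zero]
      rw [ih fuel [] (cur.reverse :: acc) (by omega)]
      simp [List.replicate_succ]

theorem pv_splitOn_allspace (m : Nat) :
    PySem.Chars.splitOn (List.replicate m ' ') [' '] = List.replicate (m + 1) [] := by
  unfold PySem.Chars.splitOn
  simp only [List.length_replicate]
  rw [pv_go_allspace m (m + 1) [] [] (by omega)]
  simp [List.replicate_succ]

theorem pv_sls_allspace (seq : String)
    (h : seq.toList.all (fun c => c == ' ') = true) :
    (PySem.Str.split? seq " ").getD [] = List.replicate (seq.toList.length + 1) "" := by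
  have hl : seq.toList = List.replicate seq.toList.length ' ' := by
    rw [List.eq_replicate_iff]
    exact ⟨rfl, by simpa using h⟩
  have hbr := PySem.Str.split?_map seq " "
  have hsep : (" " : String).toList = [' '] := rfl
  rw [hsep] at hbr
  have hsome : PySem.Chars.split? seq.toList [' ']
      = some (PySem.Chars.splitOn seq.toList [' ']) := by
    simp [PySem.Chars.split?]
  rw [hsome] at hbr
  cases hsp : PySem.Str.split? seq " " with
  | none => rw [hsp] at hbr; simp at hbr
  | some r =>
    rw [hsp] at hbr
    simp only [Option.map_some, Option.some_inj] at hbr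
    rw [hl, pv_splitOn_allspace] at hbr
    simp only [Option.getD_some]
    rw [List.eq_replicate_iff]
    constructor
    · have := congrArg List.length hbr
      simpa using this
    · intro x hx
      have hmem : x.toList ∈ List.map String.toList r := List.mem_map_of_mem hx
      rw [hbr] at hmem
      have : x.toList = [] := List.eq_of_mem_replicate hmem
      exact String.toList_inj.mp this

-- joining tokens that are all spaces gives a run of spaces whose length only depends on
-- the total token length and the number of tokens
theorem pv_join_allspace : ∀ (parts : List (List Char)),
    (∀ p ∈ parts, ∀ c ∈ p, c = ' ') →
    PySem.Chars.join [' '] parts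
      = List.replicate ((parts.map List.length).sum + (parts.length - 1)) ' ' := by
  intro parts
  induction parts with
  | nil => intro _; simp [PySem.Chars.join, List.intercalate]
  | cons p rest ih =>
    intro hall
    cases rest with
    | nil =>
      simp only [PySem.Chars.join, List.intercalate, List.intersperse]
      simp only [List.map_cons, List.map_nil, List.sum_cons, List.sum_nil,
        List.length_cons, List.length_nil]
      have hp : p = List.replicate p.length ' ' := by
        rw [List.eq_replicate_iff]
        exact ⟨rfl, fun c hc => hall p (by simp) c hc⟩
      simpa using hp
    | cons q t =>
      have hcc : PySem.Chars.join [' '] (p :: q :: t)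
          = p ++ [' '] ++ PySem.Chars.join [' '] (q :: t) := by
        simp [PySem.Chars.join, List.intercalate, List.intersperse]
      rw [hcc, ih (fun x hx c hc => hall x (by simp [hx]) c hc)]
      have hp : p = List.replicate p.length ' ' := by
        rw [List.eq_replicate_iff]
        exact ⟨rfl, fun c hc => hall p (by simp) c hc⟩
      rw [hp]
      rw [show ([' '] : List Char) = List.replicate 1 ' ' by rfl]
      rw [List.append_assoc, ← List.replicate_add, ← List.replicate_add]
      congr 1
      simp only [List.length_replicate, List.map_cons, List.sum_cons, List.length_cons]
      omega

-- inserting an all-space word anywhere between the empty tokens of an all-space string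
-- produces the same joined string as appending it
theorem pv_J_allspace (L : Nat) (word : String) (hw : ∀ c ∈ word.toList, c = ' ')
    (i : Int) (h0 : 0 ≤ i) :
    PySem.Str.join " "
      (PySem.List.slice (List.replicate (L+1) "") none (some i) ++ [word] ++
       PySem.List.slice (List.replicate (L+1) ("" : String)) (some i) none)
    = PySem.Str.join " " (List.replicate (L+1) ("" : String) ++ [word]) := by
  apply String.toList_inj.mp
  rw [PySem.Str.toList_join, PySem.Str.toList_join]
  rw [PySem.List.slice_to _ h0, PySem.List.slice_from _ h0]
  rw [List.take_replicate, List.drop_replicate]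
  have hside : ∀ (a b : Nat),
      PySem.Chars.join (" " : String).toList
        (List.map String.toList (List.replicate a ("" : String) ++ [word] ++ List.replicate b ""))
      = List.replicate (word.toList.length + (a + 1 + b - 1)) ' ' := by
    intro a b
    have hparts : ∀ p ∈ List.map String.toList
        (List.replicate a ("" : String) ++ [word] ++ List.replicate b ""), ∀ c ∈ p, c = ' ' := by
      intro p hp c hc
      simp only [List.map_append, List.map_replicate, List.mem_append] at hp
      rcases hp with (hp | hp) | hp
      · rw [List.eq_of_mem_replicate hp] at hc; simp at hc
      · simp at hp; rw [hp] at hc; exact hw c hc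
      · rw [List.eq_of_mem_replicate hp] at hc; simp at hc
    rw [show (" " : String).toList = [' '] from rfl]
    rw [pv_join_allspace _ hparts]
    congr 1
    simp only [List.map_append, List.map_replicate, List.map_cons, List.map_nil,
      List.sum_append, List.sum_replicate, List.length_append, List.length_replicate]
    simp
  rw [show List.replicate (L+1) ("" : String) ++ [word]
        = List.replicate (L+1) ("" : String) ++ [word] ++ List.replicate 0 "" by simp]
  rw [hside, hside]
  congr 1
  omega

theorem pv_foldl_const_from_added (e : String) : ∀ (t : List Int) (s : PySem.Set String),
    t.foldl (fun a (_ : Int) => PySem.Set.add a e) (PySem.Set.add s e) = PySem.Set.add s e := by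
  intro t
  induction t with
  | nil => intro s; rfl
  | cons x t ih =>
    intro s
    simp only [List.foldl_cons]
    rw [pv_add_add, ih s]

-- per-word inner loops agree on an all-space seq when the inserted word is all spaces too
theorem pv_inner_allspace (L : Nat) (word : String) (hw : ∀ c ∈ word.toList, c = ' ')
    (acc : PySem.Set String) :
    PySem.Set.add
      ((PySem.List.pyRange 0 (L : Int) 1).foldl
        (fun ns i => PySem.Set.add ns (PySem.Str.join " "
          (PySem.List.slice (List.replicate (L+1) "") none (some i) ++ [word] ++
           PySem.List.slice (List.replicate (L+1) ("" : String)) (some i) none))) acc)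
      (PySem.Str.join " " (List.replicate (L+1) ("" : String) ++ [word]))
    = ((PySem.List.pyRange 0 (((List.replicate (L+1) ("" : String)).length : Int) + 1) 1).map (fun i =>
        PySem.Str.join " "
          (PySem.List.slice (List.replicate (L+1) "") none (some i) ++ [word] ++
           PySem.List.slice (List.replicate (L+1) ("" : String)) (some i) none))).foldl
        PySem.Set.add acc := by
  simp only [List.length_replicate]
  rw [List.foldl_map]
  rw [PySem.List.foldl_congr_mem (PySem.List.pyRange 0 (L : Int) 1) _
    (fun ns (_ : Int) => PySem.Set.add ns
      (PySem.Str.join " " (List.replicate (L+1) ("" : String) ++ [word]))) _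
    (by
      intro a x hx
      have hx' := (PySem.List.mem_pyRange_one).1 hx
      rw [pv_J_allspace L word hw x hx'.1])]
  rw [PySem.List.foldl_congr_mem (PySem.List.pyRange 0 (((L+1 : Nat) : Int) + 1) 1) _
    (fun ns (_ : Int) => PySem.Set.add ns
      (PySem.Str.join " " (List.replicate (L+1) ("" : String) ++ [word]))) _
    (by
      intro a x hx
      have hx' := (PySem.List.mem_pyRange_one).1 hx
      rw [pv_J_allspace L word hw x hx'.1])]
  rw [pv_add_foldl_const]
  rw [PySem.List.pyRange_one_cons (by push_cast; omega)]
  simp only [List.foldl_cons]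
  rw [pv_foldl_const_from_added]

-- ===== B-side lemmas: characterizing the prefix/suffix join tables =====

-- " ".join([x]) = x
theorem pv_join_one (x : String) : PySem.Str.join " " [x] = x := by
  apply String.toList_inj.mp
  rw [PySem.Str.toList_join]
  simp [PySem.Chars.join_singleton]

-- join splits over ++ of two nonempty lists (chars level)
theorem pv_cjoin_append (sep : List Char) : ∀ (xs ys : List (List Char)), xs ≠ [] → ys ≠ [] →
    PySem.Chars.join sep (xs ++ ys) = PySem.Chars.join sep xs ++ sep ++ PySem.Chars.join sep ys := by
  intro xs
  induction xs with
  | nil => intro ys h _; exact absurd rfl h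
  | cons a t ih =>
    intro ys _ hy
    cases t with
    | nil =>
      cases ys with
      | nil => exact absurd rfl hy
      | cons z u =>
        simp [PySem.Chars.join, List.intercalate, List.intersperse]
    | cons b u =>
      have h1 : PySem.Chars.join sep (a :: b :: (u ++ ys))
          = a ++ sep ++ PySem.Chars.join sep (b :: (u ++ ys)) := by
        simp [PySem.Chars.join, List.intercalate, List.intersperse]
      have h2 : PySem.Chars.join sep (a :: b :: u)
          = a ++ sep ++ PySem.Chars.join sep (b :: u) := by
        simp [PySem.Chars.join, List.intercalate, List.intersperse]
      have ih' := ih ys (by simp) hy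
      rw [List.cons_append] at ih'
      simp only [List.cons_append]
      rw [h1, ih', h2]
      simp [List.append_assoc]

-- join splits over ++ of two nonempty lists (string level)
theorem pv_join_append (xs ys : List String) (hx : xs ≠ []) (hy : ys ≠ []) :
    PySem.Str.join " " (xs ++ ys) = PySem.Str.join " " xs ++ " " ++ PySem.Str.join " " ys := by
  apply String.toList_inj.mp
  simp only [String.toList_append, PySem.Str.toList_join, List.map_append]
  rw [pv_cjoin_append (" " : String).toList (xs.map String.toList) (ys.map String.toList)
    (by simpa using hx) (by simpa using hy)]

-- prefs[k] = " ".join(sls[:k+1])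
theorem pv_prefJoins_spec : ∀ (sls : List String),
    pvPrefJoins sls
      = (List.range sls.length).map (fun k => PySem.Str.join " " (sls.take (k+1))) := by
  intro sls
  induction sls using List.reverseRecOn with
  | nil => simp [pvPrefJoins]
  | append_singleton l x ih =>
    have h1 : pvPrefJoins (l ++ [x])
        = pvPrefJoins l ++ [match (pvPrefJoins l).getLast? with
                            | none => x
                            | some last => last ++ " " ++ x] := by
      simp [pvPrefJoins, List.foldl_append]
    rcases eq_or_ne l [] with hl | hlne
    · subst hl
      simp [pvPrefJoins, pv_join_one]
    · have hlast : (pvPrefJoins l).getLast? = some (PySem.Str.join " " l) := by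
        rw [ih]
        have hlen : 0 < l.length := List.length_pos_of_ne_nil hlne
        rw [show l.length = (l.length - 1) + 1 by omega, List.range_succ, List.map_append]
        simp
        rw [show l.length - 1 + 1 = l.length by omega, List.take_length]
      rw [h1, hlast, ih]
      simp only [List.length_append, List.length_cons, List.length_nil]
      rw [List.range_succ, List.map_append]
      simp only [List.map_cons, List.map_nil]
      congr 1
      · apply List.map_congr_left
        intro k hk
        have hk' : k + 1 ≤ l.length := by
          have := List.mem_range.1 hk; omega
        rw [List.take_append_of_le_length hk']
      · rw [List.take_of_length_le (by simp)]
        rw [pv_join_append l [x] hlne (by simp), pv_join_one]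

-- sufs[k] = " ".join(sls[k:])
theorem pv_sufJoins_spec : ∀ (sls : List String),
    (pvSufJoinsRev sls).reverse
      = (List.range sls.length).map (fun k => PySem.Str.join " " (sls.drop k)) := by
  intro sls
  induction sls with
  | nil => simp [pvSufJoinsRev]
  | cons t rest ih =>
    have h1 : pvSufJoinsRev (t :: rest)
        = pvSufJoinsRev rest ++ [match (pvSufJoinsRev rest).getLast? with
                                 | none => t
                                 | some last => t ++ " " ++ last] := by
      simp [pvSufJoinsRev, List.foldl_append]
    rcases eq_or_ne rest [] with hr | hrne
    · subst hr
      simp [pvSufJoinsRev, pv_join_one]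
    · have hlast : (pvSufJoinsRev rest).getLast? = some (PySem.Str.join " " rest) := by
        rw [← List.head?_reverse, ih]
        have hlen : 0 < rest.length := List.length_pos_of_ne_nil hrne
        rw [show rest.length = (rest.length - 1) + 1 by omega, List.range_succ_eq_map]
        simp
      rw [h1, hlast]
      rw [List.reverse_append]
      simp only [List.reverse_cons, List.reverse_nil, List.nil_append, List.singleton_append]
      rw [ih]
      simp only [List.length_cons]
      rw [List.range_succ_eq_map, List.map_cons, List.map_map]
      congr 1
      · simp only [List.drop_zero]
        rw [show (t :: rest) = [t] ++ rest by simp]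
        rw [pv_join_append [t] rest (by simp) hrne]
        all_goals rw [pv_join_one]

-- ===== B rewritten to the insertion-string map form =====

theorem pv_alt_eq (seq : String) (words : List String) :
    update_next_pos_alt seq words
      = PySem.Set.ofList (words.flatMap (fun word =>
          (PySem.List.pyRange 0 ((((PySem.Str.split? seq " ").getD []).length : Int) + 1) 1).map (fun i =>
            PySem.Str.join " "
              (PySem.List.slice ((PySem.Str.split? seq " ").getD []) none (some i) ++ [word] ++
               PySem.List.slice ((PySem.Str.split? seq " ").getD []) (some i) none)))) := by
  simp only [update_next_pos_alt]
  rw [PySem.Set.ofList_eq_foldl, List.foldl_flatMap]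
  apply PySem.List.foldl_congr_mem
  intro out word _
  rw [List.foldl_map]
  apply PySem.List.foldl_congr_mem
  intro acc i hi
  have hi' := (PySem.List.mem_pyRange_one).1 hi
  have h0 : (0 : Int) ≤ i := hi'.1
  set sls := (PySem.Str.split? seq " ").getD [] with hsls
  have hne : sls ≠ [] := pv_sls_ne_nil seq
  have hnpos : 0 < sls.length := List.length_pos_of_ne_nil hne
  have hilt : i < (sls.length : Int) + 1 := hi'.2
  rw [PySem.List.slice_to _ h0, PySem.List.slice_from _ h0]
  rw [pv_sufJoins_spec, pv_prefJoins_spec]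
  by_cases hz : i = 0
  · rw [if_pos hz]
    subst hz
    have hg : PySem.List.pyGet?
        ((List.range sls.length).map (fun k => PySem.Str.join " " (sls.drop k))) (0:Int)
        = some (PySem.Str.join " " sls) := by
      rw [show ((0:Int)) = ((0:Nat):Int) by simp, PySem.List.pyGet?_natCast]
      rw [List.getElem?_eq_getElem (by simpa using hnpos), List.getElem_map, List.getElem_range]
      simp
    rw [hg]
    simp only [Option.getD_some, Int.toNat_zero, List.take_zero, List.drop_zero,
      List.nil_append]
    rw [pv_join_append [word] sls (by simp) hne, pv_join_one]
  · rw [if_neg hz]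
    have hipos : 1 ≤ i := by omega
    have hidx : i - 1 = (((i.toNat - 1) : Nat) : Int) := by omega
    have hidxlt : i.toNat - 1 < sls.length := by omega
    by_cases hn : i = (sls.length : Int)
    · rw [if_pos hn]
      rw [hidx, PySem.List.pyGet?_natCast]
      rw [List.getElem?_eq_getElem (by simpa using hidxlt), List.getElem_map, List.getElem_range]
      simp only [Option.getD_some]
      have htk : i.toNat - 1 + 1 = sls.length := by omega
      rw [htk, List.take_length]
      have htk2 : List.take i.toNat sls = sls := List.take_of_length_le (by omega)
      have hdr : List.drop i.toNat sls = [] := List.drop_eq_nil_of_le (by omega)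
      rw [htk2, hdr, List.append_nil]
      rw [pv_join_append sls [word] hne (by simp), pv_join_one]
    · rw [if_neg hn]
      have hilt' : i < (sls.length : Int) := by omega
      rw [hidx, PySem.List.pyGet?_natCast]
      rw [List.getElem?_eq_getElem (by simpa using hidxlt), List.getElem_map, List.getElem_range]
      rw [show (i : Int) = ((i.toNat : Nat) : Int) by omega, PySem.List.pyGet?_natCast]
      rw [List.getElem?_eq_getElem (by simp; omega), List.getElem_map, List.getElem_range]
      simp only [Option.getD_some, Int.toNat_natCast]
      rw [show i.toNat - 1 + 1 = i.toNat by omega]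
      have htne : List.take i.toNat sls ≠ [] := by
        apply List.ne_nil_of_length_pos
        rw [List.length_take]
        omega
      have hdne : List.drop i.toNat sls ≠ [] := by
        apply List.ne_nil_of_length_pos
        rw [List.length_drop]
        omega
      rw [show (List.take i.toNat sls ++ [word] ++ List.drop i.toNat sls)
            = List.take i.toNat sls ++ ([word] ++ List.drop i.toNat sls) by simp [List.append_assoc]]
      rw [pv_join_append (List.take i.toNat sls) ([word] ++ List.drop i.toNat sls) htne (by simp)]
      rw [pv_join_append [word] (List.drop i.toNat sls) (by simp) hdne, pv_join_one]
      simp [String.append_assoc]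

-- ===== VERDICT (by name: the statement is the Claim_ definition above) =====
theorem update_next_pos_spec : Claim_unchanged_update_next_pos := by
  intro seq words _ hD
  rw [pv_alt_eq]
  simp only [update_next_pos]
  rw [PySem.Set.ofList_eq_foldl, List.foldl_flatMap]
  by_cases hall : seq.toList.all (fun c => c == ' ') = true
  · have hws : words.all (fun w => w.toList.all (fun c => c == ' ')) = true := by
      by_contra hne
      exact hD ⟨hall, hne⟩
    have hL : PySem.Str.len seq = (seq.toList.length : Int) := by
      simp [PySem.Str.len_eq]
    rw [pv_sls_allspace seq hall, hL]
    apply PySem.List.foldl_congr_mem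
    intro acc word hword
    have hw : ∀ c ∈ word.toList, c = ' ' := by
      have := (List.all_eq_true.mp hws) word hword
      simpa using this
    exact pv_inner_allspace seq.toList.length word hw acc
  · have hle := pv_sls_len_le seq hall
    apply PySem.List.foldl_congr_mem
    intro acc word _
    exact pv_inner ((PySem.Str.split? seq " ").getD []) word (PySem.Str.len seq) hle acc

theorem update_next_pos_changed : Claim_changed_update_next_pos := by
  unfold Claim_changed_update_next_pos; decide
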